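-- pv_equiv track=rewrite | github.com/ctfcompfest/compfest12-qualification | web/codebackup/web/lib/myrandom.py | calculate
-- ===== SOURCE A (Python) =====
-- def calculate(n):
--     ret = 0
--     for i in range((1 << 7), -1, -1):
--         if (n & (1 << i)):
--             ret = (ret << 2) + (n >> (i + 1) << 2) + 1
--         else:
--             ret <<= 2
--     return ret
-- ===== SOURCE B (Python) =====
-- def calculate(n):
--     # Recursion on the number itself: peel the low bit, recurse on n >> 1.
--     # For odd m, ((m >> 1) << 2) + 1 == 2*m - 1 under Python floor shifts.
--     def go(m, k):
--         if k == 0: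
--             return 0
--         return (2 * m - 1 if m & 1 else 0) + 4 * go(m >> 1, k - 1)
--     return go(n, 129)
-- ===== Notes on version B (the rewrite author's own statement) =====
-- stated objective: alternative
-- what changed: Replaces A's indexed loop over bit positions 128..0 (which re-extracts bit i with n&(1<<i), recomputes n>>(i+1) each step and Horner-shifts an accumulator) by a recursion on the number itself: peel the low bit, add 2*m-1 when m is odd (algebraically equal to ((m>>1)<<2)+1), and recurse on m>>1 scaled by 4 -- no bit indices, masks or accumulator shifts.
import Mathlib
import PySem

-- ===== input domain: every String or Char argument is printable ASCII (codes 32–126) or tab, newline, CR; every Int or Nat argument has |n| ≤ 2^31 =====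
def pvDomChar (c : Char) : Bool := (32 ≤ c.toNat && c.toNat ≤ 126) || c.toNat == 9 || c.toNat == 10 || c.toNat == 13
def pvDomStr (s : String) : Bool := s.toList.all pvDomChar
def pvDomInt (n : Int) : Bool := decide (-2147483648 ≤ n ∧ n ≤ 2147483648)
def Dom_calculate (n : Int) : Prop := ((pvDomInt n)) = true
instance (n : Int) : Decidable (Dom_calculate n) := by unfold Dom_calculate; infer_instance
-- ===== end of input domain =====

-- B replaces A's indexed Horner loop over bit positions by a recursion on the number
-- itself: peel the low bit (contribution 2*m-1 when m is odd), recurse on m >> 1.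

-- ===== PORT A =====
def calculate (n : Int) : Int :=
  (PySem.List.pyRange ((1:Int) <<< (7:Int)) (-1) (-1)).foldl
    (fun ret i =>
      if PySem.Int.band n ((1:Int) <<< i) ≠ 0 then
        (ret <<< (2:Int)) + ((n >>> (i + 1)) <<< (2:Int)) + 1
      else ret <<< (2:Int)) 0

-- ===== PORT B =====
-- Source B's inner `go(m, k)`: k counts the remaining steps (a Nat), m is the shifted number
def calcGo (m : Int) : Nat → Int
  | 0 => 0
  | k + 1 =>
      (if PySem.Int.band m 1 ≠ 0 then 2 * m - 1 else 0) + 4 * calcGo (m >>> (1:Int)) k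

def calculate_alt (n : Int) : Int := calcGo n 129

-- ===== PRECONDITION & SPEC =====
def Spec_calculate (n : Int) (out : Int) : Prop := out = calculate_alt n
instance (n : Int) (out : Int) : Decidable (Spec_calculate n out) := by unfold Spec_calculate; infer_instance

-- ===== CLAIM (what is proved, stated in full; the proofs are below) =====
def Claim_equal_calculate : Prop := ∀ (n : Int), Dom_calculate n → Spec_calculate n (calculate n)

-- ===== LEMMAS AND PROOFS =====

-- the contribution of bit i (Python `n & (1 << i)` truth = odd floor-shift)
def pvT (n : Int) (i : Nat) : Int :=
  if (n >>> i) % 2 ≠ 0 then ((n >>> (i + 1)) * 4) + 1 else 0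

-- the place-value sum over bits 0..k-1
def pvS (n : Int) (k : Nat) : Int :=
  ((List.range k).map (fun i => pvT n i * 4 ^ i)).sum

lemma pvS_succ (n : Int) (k : Nat) : pvS n (k + 1) = pvS n k + pvT n k * 4 ^ k := by
  simp [pvS, List.range_succ]

lemma natBitPos (m i : Nat) : (m &&& 2 ^ i ≠ 0) ↔ ((m >>> i) % 2 ≠ 0) := by
  have hp : 0 < 2 ^ i := Nat.two_pow_pos i
  rw [Nat.and_two_pow, Nat.testBit_eq_decide_div_mod_eq, Nat.shiftRight_eq_div_pow]
  by_cases h : m / 2 ^ i % 2 = 1 <;> simp [h] <;> omega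

lemma natBitNeg (m i : Nat) : (2 ^ i - (2 ^ i &&& m) ≠ 0) ↔ ((m >>> i) % 2 = 0) := by
  have hp : 0 < 2 ^ i := Nat.two_pow_pos i
  rw [Nat.two_pow_and, Nat.testBit_eq_decide_div_mod_eq, Nat.shiftRight_eq_div_pow]
  by_cases h : m / 2 ^ i % 2 = 1 <;> simp [h] <;> omega

-- A's test `n & (1 << i)` picks bit i
lemma cond_iff (n : Int) (i : Nat) :
    (PySem.Int.band n ((1:Int) <<< i) ≠ 0) ↔ ((n >>> i) % 2 ≠ 0) := by
  have h1 : (1 : Int) <<< i = ((2 ^ i : Nat) : Int) := by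
    rw [Int.shiftLeft_eq]; push_cast; ring
  rw [h1]
  cases n with
  | ofNat m =>
      have h2 : (Int.ofNat m) >>> i = ((m >>> i : Nat) : Int) := rfl
      have h3 : PySem.Int.band (Int.ofNat m) ((2 ^ i : Nat) : Int) = ((m &&& 2 ^ i : Nat) : Int) := by
        exact_mod_cast PySem.Int.band_natCast m (2 ^ i)
      rw [h2, h3]
      have := natBitPos m i
      omega
  | negSucc m =>
      have h2 : (Int.negSucc m) >>> i = Int.negSucc (m >>> i) := rfl
      have hneg : ¬ (0 ≤ Int.negSucc m) := by omega
      have hm : (-(Int.negSucc m) - 1) = (m : Int) := by omega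
      have h3 : PySem.Int.band (Int.negSucc m) ((2 ^ i : Nat) : Int) = ((2 ^ i - (2 ^ i &&& m) : Nat) : Int) := by
        simp only [PySem.Int.band, if_neg hneg, if_pos (show (0:Int) ≤ ((2 ^ i : Nat) : Int) by positivity), hm]
        norm_cast
      rw [h2, h3]
      have := natBitNeg m i
      have h4 : Int.negSucc (m >>> i) = -((m >>> i : Nat) : Int) - 1 := by
        rw [Int.negSucc_eq]; ring
      rw [h4]
      omega

-- B's test `m & 1` picks bit 0
lemma cond_iff0 (n : Int) : (PySem.Int.band n 1 ≠ 0) ↔ (n % 2 ≠ 0) := by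
  have := cond_iff n 0
  simpa using this

lemma shl2 (a : Int) : a <<< (2:Int) = a * 4 := by
  rw [show (2:Int) = ((2:Nat):Int) from rfl, Int.shiftLeft_natCast_right, Int.shiftLeft_eq]
  norm_num

-- one step of A's loop adds pvT's value
lemma stepA_eq (n r : Int) (i : Int) (hi : 0 ≤ i) :
    (if PySem.Int.band n ((1:Int) <<< i) ≠ 0 then
        (r <<< (2:Int)) + ((n >>> (i + 1)) <<< (2:Int)) + 1
      else r <<< (2:Int)) = r * 4 + pvT n i.toNat := by
  obtain ⟨k, rfl⟩ : ∃ k : Nat, i = (k : Int) := ⟨i.toNat, by omega⟩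
  rw [Int.shiftLeft_natCast_right 1 k,
      show ((k : Int) + 1) = ((k + 1 : Nat) : Int) from by push_cast; ring,
      Int.shiftRight_natCast_right n (k + 1), Int.toNat_natCast, pvT]
  by_cases h : (n >>> k) % 2 ≠ 0
  · rw [if_pos ((cond_iff n k).2 h), if_pos h, shl2, shl2]; ring
  · rw [if_neg (fun hc => h ((cond_iff n k).1 hc)), if_neg h, shl2]; ring

lemma A_loop (n : Int) (k : Nat) : ∀ (r : Int),
    (PySem.List.pyRange (k : Int) (-1) (-1)).foldl
      (fun ret i =>
        if PySem.Int.band n ((1:Int) <<< i) ≠ 0 then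
          (ret <<< (2:Int)) + ((n >>> (i + 1)) <<< (2:Int)) + 1
        else ret <<< (2:Int)) r
    = r * 4 ^ (k + 1) + pvS n (k + 1) := by
  induction k with
  | zero =>
      intro r
      rw [PySem.List.pyRange_neg_one_cons (by norm_num),
          PySem.List.pyRange_neg_one_eq_nil (by norm_num)]
      simp only [List.foldl_cons, List.foldl_nil]
      rw [stepA_eq n r ((0:Nat):Int) (by omega)]
      simp [pvS]
  | succ k ih =>
      intro r
      rw [show ((k + 1 : Nat) : Int) = (k : Int) + 1 from by push_cast; ring,
          PySem.List.pyRange_neg_one_cons (by omega)]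
      simp only [List.foldl_cons, add_sub_cancel_right]
      rw [stepA_eq n r ((k : Int) + 1) (by omega), ih]
      rw [show ((k : Int) + 1).toNat = k + 1 from by omega, pvS_succ n (k + 1)]
      ring

-- shifting by one more bit = shifting the once-shifted number
lemma shiftRight_comp (n : Int) (j : Nat) : (n >>> (1:Nat)) >>> j = n >>> (j + 1) := by
  rw [show j + 1 = 1 + j from Nat.add_comm j 1, Int.shiftRight_add]

lemma pvT_shift (n : Int) (j : Nat) : pvT n (j + 1) = pvT (n >>> (1:Nat)) j := by
  unfold pvT
  rw [shiftRight_comp, shiftRight_comp]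

-- for odd n (any sign), floor-shift satisfies (n >> 1) * 2 = n - 1
lemma sr1 (n : Int) (h : n % 2 ≠ 0) : (n >>> (1:Nat)) * 2 = n - 1 := by
  cases n with
  | ofNat m =>
      have h2 : (Int.ofNat m) >>> (1:Nat) = ((m >>> 1 : Nat) : Int) := rfl
      have h3 : m >>> 1 = m / 2 := by rw [Nat.shiftRight_eq_div_pow]
      rw [h2, h3]
      have hm : (Int.ofNat m) % 2 ≠ 0 := h
      have : (Int.ofNat m) = (m : Int) := rfl
      omega
  | negSucc m =>
      have h2 : (Int.negSucc m) >>> (1:Nat) = Int.negSucc (m >>> 1) := rfl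
      have h3 : m >>> 1 = m / 2 := by rw [Nat.shiftRight_eq_div_pow]
      rw [h2, h3, Int.negSucc_eq, Int.negSucc_eq] at *
      omega

-- the low-bit contribution in B's simplified form
lemma pvT_zero (n : Int) :
    pvT n 0 = (if PySem.Int.band n 1 ≠ 0 then 2 * n - 1 else 0) := by
  unfold pvT
  simp only [Int.shiftRight_zero, Nat.zero_add]
  by_cases h : n % 2 ≠ 0
  · rw [if_pos h, if_pos ((cond_iff0 n).2 h)]
    have := sr1 n h
    omega
  · rw [if_neg h, if_neg (fun hc => h ((cond_iff0 n).1 hc))]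

-- the place-value sum peels off the low bit
lemma pvS_low (n : Int) (k : Nat) :
    pvS n (k + 1) = pvT n 0 + 4 * pvS (n >>> (1:Nat)) k := by
  induction k with
  | zero => simp [pvS_succ, pvS]
  | succ k ih =>
      rw [pvS_succ n (k + 1), ih, pvT_shift, pvS_succ (n >>> (1:Nat)) k]
      ring

-- B's recursion computes the same place-value sum
lemma go_eq (k : Nat) : ∀ (n : Int), calcGo n k = pvS n k := by
  induction k with
  | zero => intro n; simp [calcGo, pvS]
  | succ k ih =>
      intro n
      have h1 : n >>> (1:Int) = n >>> (1:Nat) := by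
        rw [show (1:Int) = ((1:Nat):Int) from rfl, Int.shiftRight_natCast_right]
      rw [calcGo, h1, ih (n >>> (1:Nat)), pvS_low, pvT_zero]

-- ===== VERDICT (by name: the statement is the Claim_ definition above) =====
theorem calculate_spec : Claim_equal_calculate := by
  intro n _
  unfold Spec_calculate calculate calculate_alt
  rw [show ((1:Int) <<< (7:Int)) = ((128 : Nat) : Int) from by decide,
      A_loop n 128 0, go_eq 129 n]
  norm_num
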